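-- pv_equiv track=rewrite | github.com/xShadie/saphira | make_pack/root/ingamewikiui.py | MakeMoneyText
-- ===== SOURCE A (Python) =====
-- def MakeMoneyText(money):
-- 	money = str(money)
-- 	(original, sLen, kLen) = (money, len(money), 3)
--
-- 	while sLen > kLen and original[sLen-kLen:] == "000":
-- 		money = money[::-1].replace("000"[::-1], "k"[::-1], 1)[::-1]
-- 		original = original[:sLen - kLen]
-- 		sLen -= kLen
--
-- 	return money
-- ===== SOURCE B (Python) =====
-- def MakeMoneyText(money):
--     s = str(money)
--     L = len(s)
--     tz = L - len(s.rstrip('0'))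
--     count = min(tz // 3, (L - 1) // 3)
--     return s[:L - 3 * count] + 'k' * count
-- ===== Notes on version B (the rewrite author's own statement) =====
-- stated objective: simpler
-- what changed: A's while-loop that repeatedly reverses the string, replaces the first reversed zero-triple with 'k' and truncates is replaced by a closed-form arithmetic count of 'k' suffixes (from the number of trailing zero digits and the string length, capped by A's length guard), returned as one slice plus a repeated 'k', with no loop.
import Mathlib
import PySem

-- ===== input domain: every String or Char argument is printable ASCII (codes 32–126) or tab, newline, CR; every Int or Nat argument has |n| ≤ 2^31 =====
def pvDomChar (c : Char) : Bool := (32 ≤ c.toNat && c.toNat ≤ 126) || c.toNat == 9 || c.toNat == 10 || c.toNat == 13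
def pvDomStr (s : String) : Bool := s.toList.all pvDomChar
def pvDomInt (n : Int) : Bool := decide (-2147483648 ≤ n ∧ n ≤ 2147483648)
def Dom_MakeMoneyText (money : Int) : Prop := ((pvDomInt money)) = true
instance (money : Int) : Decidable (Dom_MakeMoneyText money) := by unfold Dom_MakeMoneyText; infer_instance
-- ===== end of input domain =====

-- B replaces A's iterative reverse/replace/truncate loop with a closed-form count of 'k'
-- suffixes (min(trailing_zeros // 3, (len-1) // 3)) plus a single slice (objective: simpler).


-- ===== PORT A =====
-- s.replace(old, new, 1) for a NONEMPTY old: replaces the first occurrence only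
-- (hand port, exact for nonempty old; PySem.Str.replace has no count argument).
def replaceFirst (s : List Char) (old new : List Char) : List Char :=
  match s with
  | [] => []
  | c :: t =>
      if old.isPrefixOf (c :: t) then new ++ (c :: t).drop old.length
      else c :: replaceFirst t old new

-- A's while-loop, state (money, original, sLen); kLen = 3
def MakeMoneyTextLoop (money original : List Char) (sLen : Nat) : List Char :=
  if h : sLen > 3 ∧ PySem.List.slice original (some ((sLen : Int) - 3)) none = ['0', '0', '0'] then
    MakeMoneyTextLoop
      ((replaceFirst ((PySem.List.slice? money none none (-1)).getD []) ['0', '0', '0'] ['k']).reverse)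
      (PySem.List.slice original none (some ((sLen : Int) - 3)))
      (sLen - 3)
  else money
termination_by sLen
decreasing_by omega

def MakeMoneyText (money : Int) : String :=
  let s := PySem.Int.toChars money
  String.ofList (MakeMoneyTextLoop s s s.length)

-- ===== PORT B =====
-- s.rstrip('0') is ported by hand as reverse/dropWhile/reverse (exact for this argument)
def MakeMoneyText_alt (money : Int) : String :=
  let s := PySem.Int.toChars money
  let L := s.length
  let tz := L - ((s.reverse.dropWhile (fun c => c == '0')).reverse).length
  let count := min (tz / 3) ((L - 1) / 3)
  String.ofList (s.take (L - 3 * count) ++ List.replicate count 'k')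

-- ===== PRECONDITION & SPEC =====
def Spec_MakeMoneyText (money : Int) (out : String) : Prop := out = MakeMoneyText_alt money
instance (money : Int) (out : String) : Decidable (Spec_MakeMoneyText money out) := by unfold Spec_MakeMoneyText; infer_instance

-- ===== CLAIM (what is proved, stated in full; the proofs are below) =====
def Claim_equal_MakeMoneyText : Prop := ∀ (money : Int), Dom_MakeMoneyText money → Spec_MakeMoneyText money (MakeMoneyText money)

-- ===== LEMMAS AND PROOFS =====

-- number of trailing '0' characters, and the closed-form suffix count of B
def tzw (p : List Char) : Nat := (p.reverse.takeWhile (fun c => c == '0')).length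
def cnt (p : List Char) : Nat := min (tzw p / 3) ((p.length - 1) / 3)

lemma replaceFirst_k_prefix (i : Nat) (r : List Char) :
    replaceFirst (List.replicate i 'k' ++ '0' :: '0' :: '0' :: r) ['0', '0', '0'] ['k']
      = List.replicate i 'k' ++ 'k' :: r := by
  induction i with
  | zero => simp [replaceFirst, List.isPrefixOf]
  | succ n ih => simpa [List.replicate_succ, replaceFirst, List.isPrefixOf] using ih

lemma takeWhile_ge_three (l : List Char)
    (h : 3 ≤ (l.takeWhile (fun c => c == '0')).length) :
    ∃ r, l = '0' :: '0' :: '0' :: r := by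
  rcases l with _ | ⟨a, l⟩
  · simp at h
  by_cases ha : a = '0'
  · subst ha
    rcases l with _ | ⟨b, l⟩
    · simp [List.takeWhile] at h
    by_cases hb : b = '0'
    · subst hb
      rcases l with _ | ⟨c, l⟩
      · simp [List.takeWhile] at h
      by_cases hc : c = '0'
      · exact ⟨l, by rw [hc]⟩
      · simp [hc] at h
    · simp [hb] at h
  · simp [ha] at h

lemma cnt_zero_of (p : List Char)
    (h : ¬(p.length > 3 ∧ p.drop (p.length - 3) = ['0', '0', '0'])) : cnt p = 0 := by
  by_cases h4 : p.length > 3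
  · have hz : p.drop (p.length - 3) ≠ ['0', '0', '0'] := fun hc => h ⟨h4, hc⟩
    have htz : tzw p < 3 := by
      by_contra hge
      obtain ⟨r, hr⟩ := takeWhile_ge_three p.reverse (by unfold tzw at hge; omega)
      have hp : p = r.reverse ++ ['0', '0', '0'] := by
        have := congrArg List.reverse hr
        simpa using this
      apply hz
      rw [hp]
      have : (r.reverse ++ ['0', '0', '0'] : List Char).length - 3 = r.reverse.length := by
        simp
      rw [this, List.drop_left]
    unfold cnt
    omega
  · unfold cnt
    omega

lemma loop_eq (n : Nat) : ∀ (p : List Char) (i : Nat), p.length ≤ n →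
    MakeMoneyTextLoop (p ++ List.replicate i 'k') p p.length
      = p.take (p.length - 3 * cnt p) ++ List.replicate (i + cnt p) 'k' := by
  induction n with
  | zero =>
    intro p i hl
    have hp : p = [] := List.eq_nil_of_length_eq_zero (by omega)
    subst hp
    rw [MakeMoneyTextLoop]
    simp [cnt, tzw]
  | succ n ih =>
    intro p i hl
    rw [MakeMoneyTextLoop]
    by_cases h4 : p.length > 3
    · have hcast : ((p.length : Int) - 3) = ((p.length - 3 : Nat) : Int) := by omega
      have hslice : PySem.List.slice p (some ((p.length : Int) - 3)) none = p.drop (p.length - 3) := by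
        rw [hcast, PySem.List.slice_from_natCast]
      by_cases hz : p.drop (p.length - 3) = ['0', '0', '0']
      · rw [dif_pos ⟨h4, by rw [hslice, hz]⟩]
        have hq : p = p.take (p.length - 3) ++ ['0', '0', '0'] := by
          conv_lhs => rw [← List.take_append_drop (p.length - 3) p]
          rw [hz]
        set q := p.take (p.length - 3) with hqdef
        have hqlen : q.length = p.length - 3 := by
          rw [hqdef]; simp
        -- the reversed money and the one-count replace step
        have hrev : ((p ++ List.replicate i 'k').reverse)
            = List.replicate i 'k' ++ '0' :: '0' :: '0' :: q.reverse := by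
          conv_lhs => rw [hq]
          simp
        have hmoney :
            ((replaceFirst ((PySem.List.slice? (p ++ List.replicate i 'k') none none (-1)).getD [])
              ['0', '0', '0'] ['k']).reverse)
            = q ++ List.replicate (i + 1) 'k' := by
          rw [PySem.List.slice?_none_none_neg_one]
          simp only [Option.getD_some]
          rw [hrev, replaceFirst_k_prefix]
          simp [List.replicate_succ]
        have hto : PySem.List.slice p none (some ((p.length : Int) - 3)) = q := by
          rw [hcast, PySem.List.slice_to_natCast]
        rw [hmoney, hto, show p.length - 3 = q.length from hqlen.symm,
            ih q (i + 1) (by omega)]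
        -- arithmetic: cnt p = cnt q + 1
        have htzw : tzw p = tzw q + 3 := by
          unfold tzw
          conv_lhs => rw [hq]
          simp [List.takeWhile]
        have hcnt : cnt p = cnt q + 1 := by
          unfold cnt
          rw [htzw, hqlen]
          omega
        rw [hcnt]
        have hm : p.length - 3 * (cnt q + 1) = q.length - 3 * cnt q := by omega
        rw [hm]
        have htake : p.take (q.length - 3 * cnt q) = q.take (q.length - 3 * cnt q) := by
          conv_lhs => rw [hq]
          rw [List.take_append_of_le_length (by omega)]
        rw [← htake, show i + 1 + cnt q = i + (cnt q + 1) from by omega]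
      · rw [dif_neg (by rw [hslice]; exact fun hc => hz hc.2)]
        rw [cnt_zero_of p (fun hc => hz hc.2)]
        simp
    · rw [dif_neg (fun hc => h4 hc.1)]
      rw [cnt_zero_of p (fun hc => h4 hc.1)]
      simp

-- ===== VERDICT (by name: the statement is the Claim_ definition above) =====
theorem MakeMoneyText_spec : Claim_equal_MakeMoneyText := by
  intro money _
  unfold Spec_MakeMoneyText MakeMoneyText MakeMoneyText_alt
  set s := PySem.Int.toChars money with hs
  have h0 : MakeMoneyTextLoop s s s.length
      = s.take (s.length - 3 * cnt s) ++ List.replicate (0 + cnt s) 'k' := by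
    have := loop_eq s.length s 0 (le_refl _)
    simpa using this
  have htz : s.length - ((s.reverse.dropWhile (fun c => c == '0')).reverse).length = tzw s := by
    have hsum : (s.reverse.takeWhile (fun c => c == '0')).length
        + (s.reverse.dropWhile (fun c => c == '0')).length = s.length := by
      rw [← List.length_append, List.takeWhile_append_dropWhile, List.length_reverse]
    unfold tzw
    simp
    omega
  simp only [h0, htz]
  unfold cnt
  simp
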